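-- pv_equiv track=rewrite | github.com/pypi-data/pypi-mirror-368 | packages/contur/contur-3.1.3-py3-none-any.whl/contur/util/herwig_utils.py | groupLightQuarks
-- ===== SOURCE A (Python) =====
-- def groupLightQuarks(text, splitBquarks=False, splitTquarks=True):
--     tokens = []
--     for t in text.split(","):
--         t=t.strip()
--
--         qStrings = [
--                     "u", "s", "d", "c" ,"b", "t",
--                      "ubar", "dbar", "cbar", "sbar", "bbar", "tbar",
--                      "\\bar{u}", "\\bar{d}", "\\bar{c}", "\\bar{s}", "\\bar{b}", "\\bar{t}"
--                    ]
--         if t in  qStrings: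
--
--             t = t.replace("ubar", "qbar")
--             t = t.replace("dbar", "qbar")
--             t = t.replace("sbar", "qbar")
--             t = t.replace("cbar", "qbar")
--             t = t.replace("u", "q")
--             t = t.replace("s", "q")
--             t = t.replace("d", "q")
--             t = t.replace("c", "q")
--             if not (splitBquarks):
--                 t = t.replace("bar", "BAR").replace(
--                     "b", "q").replace("BAR", "bar")
--                 t = t.replace("bbar", "qbar")
--             if not (splitTquarks):
--                 t = t.replace("t", "q")
--                 t = t.replace("tbar", "qbar")
--         tokens += [t]
--     text = ", ".join(tokens)
--     return text
-- ===== SOURCE B (Python) =====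
-- # Structural classification instead of A's replace-chain: detect the token's
-- # flavor letter and form (plain / "<x>bar" / "\bar{<x>}"), then emit the
-- # grouped 'q' spelling of the same form when the flavor is grouped.
-- _FLAVORS = "udscbt"
--
-- def _relabel(t, splitBquarks, splitTquarks):
--     cs = list(t)
--     if len(cs) == 1 and cs[0] in _FLAVORS:
--         flavor, form = cs[0], 0
--     elif len(cs) == 4 and cs[1:] == ['b', 'a', 'r'] and cs[0] in _FLAVORS:
--         flavor, form = cs[0], 1
--     elif len(cs) == 7 and cs[:5] == ['\\', 'b', 'a', 'r', '{'] and cs[6] == '}' and cs[5] in _FLAVORS: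
--         flavor, form = cs[5], 2
--     else:
--         return t
--     grouped = flavor in "udsc" or (flavor == 'b' and not splitBquarks) or (flavor == 't' and not splitTquarks)
--     if not grouped:
--         return t
--     return ['q', 'qbar', '\\bar{q}'][form]
--
-- def groupLightQuarks(text, splitBquarks=False, splitTquarks=True):
--     return ", ".join(_relabel(t.strip(), splitBquarks, splitTquarks) for t in text.split(","))
-- ===== Notes on version B (the rewrite author's own statement) =====
-- stated objective: simpler
-- what changed: Replaces A's membership test against 18 literals followed by a flag-dependent chain of up to nine per-token replace calls with a direct structural classification of each token into flavor letter and form (plain / flavor+bar / LaTeX bar), emitting the grouped spelling of that form when the flavor is grouped.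
import Mathlib
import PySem

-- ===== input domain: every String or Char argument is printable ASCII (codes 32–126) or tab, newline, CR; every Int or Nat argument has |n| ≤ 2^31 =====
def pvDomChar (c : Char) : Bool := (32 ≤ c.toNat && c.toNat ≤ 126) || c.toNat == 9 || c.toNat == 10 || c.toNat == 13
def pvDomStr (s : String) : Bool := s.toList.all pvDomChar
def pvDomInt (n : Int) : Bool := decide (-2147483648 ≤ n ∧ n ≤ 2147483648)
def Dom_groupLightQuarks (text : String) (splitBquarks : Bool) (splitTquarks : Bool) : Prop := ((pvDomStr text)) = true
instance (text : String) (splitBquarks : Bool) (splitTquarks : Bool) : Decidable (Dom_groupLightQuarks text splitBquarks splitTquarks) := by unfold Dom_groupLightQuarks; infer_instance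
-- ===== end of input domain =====

-- B replaces A's 18-literal membership test plus replace-chain by a structural
-- flavor/form classification of each token (simpler; same return value everywhere).

-- ===== PORT A =====
-- A's qStrings list (built afresh each iteration in Python; constant, so lifted)
def glqQStrings : List (List Char) :=
  [['u'], ['s'], ['d'], ['c'], ['b'], ['t'],
   ['u','b','a','r'], ['d','b','a','r'], ['c','b','a','r'], ['s','b','a','r'], ['b','b','a','r'], ['t','b','a','r'],
   ['\\','b','a','r','{','u','}'], ['\\','b','a','r','{','d','}'], ['\\','b','a','r','{','c','}'],
   ['\\','b','a','r','{','s','}'], ['\\','b','a','r','{','b','}'], ['\\','b','a','r','{','t','}']]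

-- one loop body of A: strip, then (if recognized) the replace chain
def glqTokA (t0 : List Char) (splitBquarks splitTquarks : Bool) : List Char :=
  let t := PySem.Chars.strip t0
  if t ∈ glqQStrings then
    let t := PySem.Chars.replace t ['u','b','a','r'] ['q','b','a','r']
    let t := PySem.Chars.replace t ['d','b','a','r'] ['q','b','a','r']
    let t := PySem.Chars.replace t ['s','b','a','r'] ['q','b','a','r']
    let t := PySem.Chars.replace t ['c','b','a','r'] ['q','b','a','r']
    let t := PySem.Chars.replace t ['u'] ['q']
    let t := PySem.Chars.replace t ['s'] ['q']
    let t := PySem.Chars.replace t ['d'] ['q']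
    let t := PySem.Chars.replace t ['c'] ['q']
    let t := if !splitBquarks then
        let t := PySem.Chars.replace (PySem.Chars.replace (PySem.Chars.replace t
                  ['b','a','r'] ['B','A','R']) ['b'] ['q']) ['B','A','R'] ['b','a','r']
        PySem.Chars.replace t ['b','b','a','r'] ['q','b','a','r']
      else t
    let t := if !splitTquarks then
        PySem.Chars.replace (PySem.Chars.replace t ['t'] ['q']) ['t','b','a','r'] ['q','b','a','r']
      else t
    t
  else t

def groupLightQuarks (text : String) (splitBquarks : Bool) (splitTquarks : Bool) : String :=
  let tokens := (PySem.Chars.splitOn text.toList [',']).foldl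
      (fun acc t => acc ++ [glqTokA t splitBquarks splitTquarks]) []
  String.ofList (PySem.Chars.join [',', ' '] tokens)

-- ===== PORT B =====
def glqFlavors : List Char := ['u', 'd', 's', 'c', 'b', 't']

-- classify a stripped token: its flavor letter and form (0 plain, 1 "<x>bar", 2 "\bar{<x>}")
def glqClassify (t : List Char) : Option (Char × Nat) :=
  match t with
  | [f] => if f ∈ glqFlavors then some (f, 0) else none
  | [f, x1, x2, x3] =>
      if [x1, x2, x3] = ['b', 'a', 'r'] ∧ f ∈ glqFlavors then some (f, 1) else none
  | [x0, x1, x2, x3, x4, f, x6] =>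
      if [x0, x1, x2, x3, x4] = ['\\','b','a','r','{'] ∧ x6 = '}' ∧ f ∈ glqFlavors
      then some (f, 2) else none
  | _ => none

def glqRelabel (t : List Char) (splitBquarks splitTquarks : Bool) : List Char :=
  match glqClassify t with
  | none => t
  | some (f, form) =>
    let grouped := f ∈ (['u','d','s','c'] : List Char) ∨
                   (f = 'b' ∧ splitBquarks = false) ∨ (f = 't' ∧ splitTquarks = false)
    if grouped then
      match form with
      | 0 => ['q']
      | 1 => ['q','b','a','r']
      | _ => ['\\','b','a','r','{','q','}']
    else t

def groupLightQuarks_alt (text : String) (splitBquarks : Bool) (splitTquarks : Bool) : String :=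
  String.ofList (PySem.Chars.join [',', ' ']
    ((PySem.Chars.splitOn text.toList [',']).map
      (fun t => glqRelabel (PySem.Chars.strip t) splitBquarks splitTquarks)))

-- ===== PRECONDITION & SPEC =====
def Spec_groupLightQuarks (text : String) (splitBquarks : Bool) (splitTquarks : Bool) (out : String) : Prop := out = groupLightQuarks_alt text splitBquarks splitTquarks
instance (text : String) (splitBquarks : Bool) (splitTquarks : Bool) (out : String) : Decidable (Spec_groupLightQuarks text splitBquarks splitTquarks out) := by unfold Spec_groupLightQuarks; infer_instance

-- ===== CLAIM (what is proved, stated in full; the proofs are below) =====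
def Claim_equal_groupLightQuarks : Prop := ∀ (text : String) (splitBquarks : Bool) (splitTquarks : Bool), Dom_groupLightQuarks text splitBquarks splitTquarks → Spec_groupLightQuarks text splitBquarks splitTquarks (groupLightQuarks text splitBquarks splitTquarks)

-- ===== LEMMAS AND PROOFS =====
-- a recognized classification only happens on one of A's 18 literals
theorem glqClassify_some_mem (t : List Char) (x : Char × Nat)
    (h : glqClassify t = some x) : t ∈ glqQStrings := by
  unfold glqClassify at h
  split at h
  · split_ifs at h with hc
    · fin_cases hc <;> decide
  · split_ifs at h with hc
    · obtain ⟨heq, hm⟩ := hc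
      obtain ⟨h1, h2, h3⟩ : _ ∧ _ ∧ _ := by simpa using heq
      subst h1; subst h2; subst h3
      fin_cases hm <;> decide
  · split_ifs at h with hc
    · obtain ⟨heq, h6, hm⟩ := hc
      obtain ⟨h1, h2, h3, h4, h5⟩ : _ ∧ _ ∧ _ ∧ _ ∧ _ := by simpa using heq
      subst h1; subst h2; subst h3; subst h4; subst h5; subst h6
      fin_cases hm <;> decide
  · simp at h

theorem glqTok_eq (t : List Char) (sB sT : Bool) :
    glqTokA t sB sT = glqRelabel (PySem.Chars.strip t) sB sT := by
  unfold glqTokA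
  set s := PySem.Chars.strip t with hs
  clear_value s
  clear hs
  by_cases h : s ∈ glqQStrings
  · cases sB <;> cases sT <;> fin_cases h <;> decide
  · have hc : glqClassify s = none := by
      cases hcl : glqClassify s with
      | none => rfl
      | some x => exact absurd (glqClassify_some_mem s x hcl) h
    simp [glqRelabel, h, hc]

theorem glq_foldl_push (g : List Char → List Char) (xs : List (List Char)) (acc : List (List Char)) :
    xs.foldl (fun acc t => acc ++ [g t]) acc = acc ++ xs.map g := by
  induction xs generalizing acc with
  | nil => simp
  | cons x xs ih => simp [ih]

-- ===== VERDICT (by name: the statement is the Claim_ definition above) =====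
theorem groupLightQuarks_spec : Claim_equal_groupLightQuarks := by
  intro text sB sT _
  unfold Spec_groupLightQuarks groupLightQuarks groupLightQuarks_alt
  rw [glq_foldl_push]
  simp only [List.nil_append]
  congr 1
  congr 1
  exact List.map_congr_left (fun t _ => glqTok_eq t sB sT)
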